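-- pv_equiv track=rewrite | github.com/BrunoTeixeira1996/99PythonProblems | 01-28-lists/01.py | drop_elem_of_list
-- ===== SOURCE A (Python) =====
-- def drop_elem_of_list(listx: list, n_elem: int) -> list:
-- 	temp = 0
-- 	aux = []
-- 	for i in listx:
-- 		if temp == (n_elem - 1):
-- 			temp = 0
-- 		else:
-- 			aux.append(i)
-- 			temp += 1
--
-- 	return aux
-- ===== SOURCE B (Python) =====
-- def drop_elem_of_list(listx: list, n_elem: int) -> list:
--     out = list(listx)
--     if n_elem <= 0:
--         return out  # dropping "every n-th" for non-positive n drops nothing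
--     del out[n_elem - 1::n_elem]
--     return out
-- ===== Notes on version B (the rewrite author's own statement) =====
-- stated objective: simpler
-- what changed: Replaces A's resetting-counter accumulate loop with a copy plus one extended-slice deletion (del out[n-1::n]), guarded by the natural positivity check on the step.
import Mathlib
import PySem

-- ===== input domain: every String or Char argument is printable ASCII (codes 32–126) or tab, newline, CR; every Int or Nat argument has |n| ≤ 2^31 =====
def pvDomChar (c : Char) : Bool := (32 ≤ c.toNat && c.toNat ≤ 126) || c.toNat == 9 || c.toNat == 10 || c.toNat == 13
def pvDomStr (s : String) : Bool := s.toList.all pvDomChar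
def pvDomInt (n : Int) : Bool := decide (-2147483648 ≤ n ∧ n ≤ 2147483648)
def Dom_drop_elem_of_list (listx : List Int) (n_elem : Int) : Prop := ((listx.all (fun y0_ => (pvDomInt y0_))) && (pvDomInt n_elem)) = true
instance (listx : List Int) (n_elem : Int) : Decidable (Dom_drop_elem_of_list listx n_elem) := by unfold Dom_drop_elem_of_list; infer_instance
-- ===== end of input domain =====

-- B replaces A's resetting-counter accumulate loop with a copy plus one extended-slice deletion (simpler).


-- ===== PORT A =====
-- the for-loop over listx with state (temp, aux), transcribed as structural recursion
def pvLoopA (xs : List Int) (temp : Int) (aux : List Int) (n_elem : Int) : List Int :=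
  match xs with
  | [] => aux
  | i :: t =>
    if temp = n_elem - 1 then pvLoopA t 0 aux n_elem
    else pvLoopA t (temp + 1) (aux ++ [i]) n_elem

def drop_elem_of_list (listx : List Int) (n_elem : Int) : List Int :=
  pvLoopA listx 0 [] n_elem

-- ===== PORT B =====
-- `del out[n-1::n]` (positive step n) removes exactly the 0-based indices ≡ n-1 (mod n);
-- ported as an index-indexed recursion keeping the other elements (exact for n_elem > 0).
def pvDelSlice (xs : List Int) (i : Int) (n : Int) : List Int :=
  match xs with
  | [] => []
  | x :: t => if (i + 1) % n = 0 then pvDelSlice t (i + 1) n else x :: pvDelSlice t (i + 1) n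

def drop_elem_of_list_alt (listx : List Int) (n_elem : Int) : List Int :=
  if n_elem ≤ 0 then listx
  else pvDelSlice listx 0 n_elem

-- ===== PRECONDITION & SPEC =====
def Spec_drop_elem_of_list (listx : List Int) (n_elem : Int) (out : List Int) : Prop := out = drop_elem_of_list_alt listx n_elem
instance (listx : List Int) (n_elem : Int) (out : List Int) : Decidable (Spec_drop_elem_of_list listx n_elem out) := by unfold Spec_drop_elem_of_list; infer_instance

-- ===== CLAIM (what is proved, stated in full; the proofs are below) =====
def Claim_equal_drop_elem_of_list : Prop := ∀ (listx : List Int) (n_elem : Int), Dom_drop_elem_of_list listx n_elem → Spec_drop_elem_of_list listx n_elem (drop_elem_of_list listx n_elem)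

-- ===== LEMMAS AND PROOFS =====

-- step of Int emod for a positive divisor
theorem pv_emod_succ (c n : Int) (hn : 0 < n) :
    (c + 1) % n = if c % n = n - 1 then 0 else c % n + 1 := by
  have h0 : 0 ≤ c % n := Int.emod_nonneg c (by omega)
  have h1 : c % n < n := Int.emod_lt_of_pos c hn
  have hc : c % n + n * (c / n) = c := Int.emod_add_ediv c n
  by_cases h : c % n = n - 1
  · simp only [h]
    have hd : n * (c / n + 1) = n * (c / n) + n := by ring
    have : c + 1 = n * (c / n + 1) := by omega
    rw [this]
    exact Int.mul_emod_right n _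
  · simp only [if_neg h]
    have : c + 1 = c % n + 1 + n * (c / n) := by omega
    rw [this, Int.add_mul_emod_self_left]
    exact Int.emod_eq_of_lt (by omega) (by omega)

-- n ≤ 0: the test temp = n-1 never fires (temp stays ≥ 0), so A copies the list
theorem pvLoopA_nonpos (n : Int) (hn : n ≤ 0) :
    ∀ (xs aux : List Int) (temp : Int), 0 ≤ temp → pvLoopA xs temp aux n = aux ++ xs := by
  intro xs
  induction xs with
  | nil => intro aux temp _; simp [pvLoopA]
  | cons x t ih =>
    intro aux temp ht
    have : ¬ temp = n - 1 := by omega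
    simp only [pvLoopA, if_neg this]
    rw [ih (aux ++ [x]) (temp + 1) (by omega)]
    simp

-- n > 0: the counter temp is always c % n for c elements processed so far
theorem pvLoopA_pos (n : Int) (hn : 0 < n) :
    ∀ (xs aux : List Int) (c : Int), pvLoopA xs (c % n) aux n = aux ++ pvDelSlice xs c n := by
  intro xs
  induction xs with
  | nil => intro aux c; simp [pvLoopA, pvDelSlice]
  | cons x t ih =>
    intro aux c
    have hstep := pv_emod_succ c n hn
    by_cases h : c % n = n - 1
    · have hz : (c + 1) % n = 0 := by rw [hstep, if_pos h]
      simp only [pvLoopA, if_pos h, pvDelSlice, if_pos hz]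
      have := ih aux (c + 1)
      rwa [hz] at this
    · have hnz : ¬ (c + 1) % n = 0 := by
        rw [hstep, if_neg h]
        have h0 : 0 ≤ c % n := Int.emod_nonneg c (by omega)
        omega
      simp only [pvLoopA, if_neg h, pvDelSlice, if_neg hnz]
      have := ih (aux ++ [x]) (c + 1)
      rw [hstep, if_neg h] at this
      rw [this]
      simp

-- ===== VERDICT (by name: the statement is the Claim_ definition above) =====
theorem drop_elem_of_list_spec : Claim_equal_drop_elem_of_list := by
  intro listx n_elem _
  unfold Spec_drop_elem_of_list drop_elem_of_list drop_elem_of_list_alt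
  by_cases hn : n_elem ≤ 0
  · rw [if_pos hn, pvLoopA_nonpos n_elem hn listx [] 0 le_rfl]; simp
  · have hpos : 0 < n_elem := by omega
    rw [if_neg hn]
    have := pvLoopA_pos n_elem hpos listx [] 0
    rw [Int.zero_emod] at this
    rw [this]
    simp
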